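-- pv_equiv track=rewrite | github.com/RishabhS21/col100_assignments | a5-part 2/2021CS10103_assignment_5-b.py | same_tab_before
-- ===== SOURCE A (Python) =====
-- def same_tab_before(tab_list):
--     decrease=[]
--     for i in range(len(tab_list)):
--         if tab_list[i]<tab_list[i-1]:
--             j=i-1
--             while j>=0:
--                 if tab_list[j]==tab_list[i]:
--                     decrease.append((i,j))   # i is the element value decreased after
--                     break
--                 j-=1
--
--
--     return decrease
-- ===== SOURCE B (Python) =====
-- def same_tab_before(tab_list):
--     last = {}        # value -> most recent index seen so far
--     out = []
--     prev = None
--     for i, v in enumerate(tab_list):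
--         if prev is not None and v < prev and v in last:
--             out.append((i, last[v]))
--         last[v] = i
--         prev = v
--     return out
-- ===== Notes on version B (the rewrite author's own statement) =====
-- stated objective: faster
-- what changed: Replaced A's backward inner scan for the most recent equal earlier element with a single forward pass that maintains a dict mapping each value to its most recent previous index (and tracks the previous element instead of re-indexing), turning O(n^2) into O(n).
import Mathlib
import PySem

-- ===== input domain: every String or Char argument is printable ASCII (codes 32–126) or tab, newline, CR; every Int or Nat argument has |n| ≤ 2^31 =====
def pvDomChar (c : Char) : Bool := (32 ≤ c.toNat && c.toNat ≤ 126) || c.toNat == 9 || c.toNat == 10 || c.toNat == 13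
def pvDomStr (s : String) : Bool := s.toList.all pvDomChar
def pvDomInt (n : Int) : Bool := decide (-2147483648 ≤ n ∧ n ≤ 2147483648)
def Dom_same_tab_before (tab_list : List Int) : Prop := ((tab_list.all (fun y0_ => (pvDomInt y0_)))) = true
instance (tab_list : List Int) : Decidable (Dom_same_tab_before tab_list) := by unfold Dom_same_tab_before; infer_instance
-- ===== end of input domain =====

-- B replaces A's backward inner scan with one forward pass keeping a dict value → most-recent-previous-index (objective: faster, O(n^2) → O(n)).

-- ===== PORT A =====
-- inner 'while j>=0: if tab_list[j]==tab_list[i]: break; j-=1' — argument is j+1 (starts at i)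
def findPrevA (tab_list : List Int) (vi : Int) : Nat → Option Nat
  | 0 => none
  | j+1 => if PySem.List.pyGetD tab_list (j : Int) 0 = vi then some j else findPrevA tab_list vi j

-- body of 'for i in range(len(tab_list))'
def stepA (tab_list : List Int) (decrease : List (Int × Int)) (i : Nat) : List (Int × Int) :=
  if PySem.List.pyGetD tab_list (i : Int) 0 < PySem.List.pyGetD tab_list ((i : Int) - 1) 0 then
    match findPrevA tab_list (PySem.List.pyGetD tab_list (i : Int) 0) i with
    | some j => decrease ++ [((i : Int), (j : Int))]
    | none => decrease
  else decrease

def same_tab_before (tab_list : List Int) : List (Int × Int) :=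
  (List.range tab_list.length).foldl (stepA tab_list) []

-- ===== PORT B =====
-- state: (last : value → most recent index, prev element, out); body of 'for i, v in enumerate(tab_list)'
def stepB (st : PySem.Dict Int Int × Option Int × List (Int × Int)) (p : Int × Int) :
    PySem.Dict Int Int × Option Int × List (Int × Int) :=
  let out :=
    match st.2.1 with
    | some pv =>
        if p.2 < pv then
          match st.1.get? p.2 with
          | some j => st.2.2 ++ [(p.1, j)]
          | none => st.2.2
        else st.2.2
    | none => st.2.2
  (st.1.insert p.2 p.1, some p.2, out)

def same_tab_before_alt (tab_list : List Int) : List (Int × Int) :=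
  ((PySem.List.enumerate tab_list 0).foldl stepB (PySem.Dict.empty, none, [])).2.2

-- ===== PRECONDITION & SPEC =====
def Spec_same_tab_before (tab_list : List Int) (out : List (Int × Int)) : Prop := out = same_tab_before_alt tab_list
instance (tab_list : List Int) (out : List (Int × Int)) : Decidable (Spec_same_tab_before tab_list out) := by unfold Spec_same_tab_before; infer_instance

-- ===== CLAIM (what is proved, stated in full; the proofs are below) =====
def Claim_equal_same_tab_before : Prop := ∀ (tab_list : List Int), Dom_same_tab_before tab_list → Spec_same_tab_before tab_list (same_tab_before tab_list)

-- ===== LEMMAS AND PROOFS =====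

theorem pyGetD_append_lt (xs : List Int) (x : Int) (i : Nat) (h : i < xs.length) :
    PySem.List.pyGetD (xs ++ [x]) (i : Int) 0 = PySem.List.pyGetD xs (i : Int) 0 := by
  simp [PySem.List.pyGetD_natCast, List.getD, List.getElem?_append_left h]

theorem pyGetD_append_len (xs : List Int) (x : Int) :
    PySem.List.pyGetD (xs ++ [x]) (xs.length : Int) 0 = x := by
  simp [PySem.List.pyGetD_natCast, List.getD]

theorem findPrevA_append (xs : List Int) (x v : Int) (j : Nat) (h : j ≤ xs.length) :
    findPrevA (xs ++ [x]) v j = findPrevA xs v j := by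
  induction j with
  | zero => rfl
  | succ j ih =>
      simp only [findPrevA, pyGetD_append_lt xs x j (by omega), ih (by omega)]

theorem stepA_append (xs : List Int) (x : Int) (acc : List (Int × Int)) (i : Nat) (h : i < xs.length) :
    stepA (xs ++ [x]) acc i = stepA xs acc i := by
  cases i with
  | zero =>
      simp only [stepA, findPrevA]
      split <;> split <;> rfl
  | succ i =>
      have h1 : (((i+1 : Nat)) : Int) - 1 = ((i : Nat) : Int) := by push_cast; ring
      simp only [stepA, h1,
        pyGetD_append_lt xs x (i+1) h, pyGetD_append_lt xs x i (by omega),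
        findPrevA_append xs x _ (i+1) (by omega)]

theorem enumerate_append_singleton (xs : List Int) (x : Int) (s : Int) :
    PySem.List.enumerate (xs ++ [x]) s = PySem.List.enumerate xs s ++ [(s + xs.length, x)] := by
  induction xs generalizing s with
  | nil => simp [PySem.List.enumerate_cons, PySem.List.enumerate_nil]
  | cons y ys ih =>
      simp only [List.cons_append, PySem.List.enumerate_cons, ih, List.length_cons]
      have h2 : s + 1 + (ys.length : Int) = s + ((ys.length + 1 : Nat) : Int) := by push_cast; ring
      rw [h2]

-- B's fold state after the whole list
def bFold (tab_list : List Int) : PySem.Dict Int Int × Option Int × List (Int × Int) :=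
  (PySem.List.enumerate tab_list 0).foldl stepB (PySem.Dict.empty, none, [])

theorem bFold_invariant (xs : List Int) :
    (bFold xs).2.2 = same_tab_before xs ∧
    (bFold xs).2.1 = xs.getLast? ∧
    ∀ v, (bFold xs).1.get? v = (findPrevA xs v xs.length).map (fun j => (j : Int)) := by
  induction xs using List.reverseRecOn with
  | nil =>
      refine ⟨rfl, rfl, fun v => ?_⟩
      simp [bFold, PySem.List.enumerate_nil, findPrevA, PySem.Dict.empty, PySem.Dict.get?]
  | append_singleton xs x ih =>
      obtain ⟨hout, hprev, hdict⟩ := ih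
      have hstep : bFold (xs ++ [x]) = stepB (bFold xs) (((xs.length : Int)), x) := by
        simp [bFold, enumerate_append_singleton, List.foldl_append]
      have hA : same_tab_before (xs ++ [x]) =
          stepA (xs ++ [x]) (same_tab_before xs) xs.length := by
        simp only [same_tab_before, List.length_append, List.length_cons, List.length_nil,
          List.range_succ, List.foldl_append, List.foldl_cons, List.foldl_nil]
        congr 1
        exact PySem.List.foldl_congr_mem _ _ _ _
          (fun acc i hi => stepA_append xs x acc i (List.mem_range.mp hi))
      refine ⟨?_, ?_, ?_⟩
      · -- out component
        rw [hstep, hA]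
        cases xs using List.reverseRecOn with
        | nil =>
            simp only [stepB, hprev]
            simp [stepA, findPrevA, same_tab_before, bFold, PySem.List.enumerate_nil]
        | append_singleton ys y =>
            have hlast : (ys ++ [y]).getLast? = some y := by simp
            have hlen1 : 1 ≤ (ys ++ [y]).length := by simp
            simp only [stepB, hprev, hlast]
            -- A's step at i = len(xs): prev index is len-1
            have hvi : PySem.List.pyGetD ((ys ++ [y]) ++ [x]) (((ys ++ [y]).length : Int)) 0 = x :=
              pyGetD_append_len _ x
            have hprevidx : (((ys ++ [y]).length : Int)) - 1 = (((ys ++ [y]).length - 1 : Nat) : Int) := by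
              omega
            have hpv : PySem.List.pyGetD ((ys ++ [y]) ++ [x]) ((((ys ++ [y]).length - 1 : Nat)) : Int) 0 = y := by
              rw [pyGetD_append_lt _ x _ (by simp)]
              simp [PySem.List.pyGetD_natCast, List.getD]
            simp only [stepA, hvi, hprevidx, hpv,
          findPrevA_append (ys ++ [y]) x x _ (le_refl _), hdict x, hout]
            cases findPrevA (ys ++ [y]) x (ys ++ [y]).length <;> simp
      · rw [hstep]; simp [stepB]
      · intro v
        rw [hstep]
        simp only [stepB, List.length_append, List.length_cons, List.length_nil, findPrevA]
        by_cases hv : v = x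
        · subst hv
          rw [PySem.Dict.get?_insert_self]
          rw [pyGetD_append_len xs v]
          simp
        · rw [PySem.Dict.get?_insert_of_ne _ _ hv, hdict v,
            findPrevA_append xs x v xs.length (le_refl _)]
          rw [pyGetD_append_len xs x]
          simp [Ne.symm hv]

-- ===== VERDICT (by name: the statement is the Claim_ definition above) =====
theorem same_tab_before_spec : Claim_equal_same_tab_before := by
  intro tab_list _
  unfold Spec_same_tab_before same_tab_before_alt
  exact ((bFold_invariant tab_list).1).symm
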